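-- pv_equiv track=rewrite | github.com/harishvc/challenges | dp-coin-play.py | MaxScoreP
-- ===== SOURCE A (Python) =====
-- def MaxScoreP(a,start,end,path):
-- 	#IMPORTANT: exit condition
-- 	if start > end:
-- 		return 0,path
-- 	else:
-- 		#1st branch
-- 		path1Value,path1Path = MaxScoreP(a,start+2,end,path+[a[start]])
-- 		path2Value,path2Path = MaxScoreP(a,start+1,end-1,path+[a[start]])
-- 		if path1Value < path2Value:
-- 			b1v,b1p = a[start]+path1Value,path1Path
-- 		else:
-- 			b1v,b1p = a[start]+path2Value,path2Path
--
--
-- 		#2nd branch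
-- 		path3Value,path3Path = MaxScoreP(a,start+1,end-1,path+[a[end]])
-- 		path4Value,path4Path = MaxScoreP(a,start,end-2,path+[a[end]])
-- 		if path3Value < path4Value:
-- 			b2v,b2p = a[end]+path3Value,path3Path
-- 		else:
-- 			b2v,b2p = a[end]+path4Value,path4Path
--
-- 		#return max of branch1, baranch2
-- 		if b1v >  b2v:
-- 			return b1v,b1p
-- 		else:
-- 			return b2v,b2p
-- ===== SOURCE B (Python) =====
-- def MaxScoreP(a, start, end, path):
--     # Memoized top-down DP on (s, e): each state stores (value, chosen suffix);
--     # the prefix `path` is appended once at the end.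
--     memo = {}
--
--     def solve(s, e):
--         if s > e:
--             return 0, []
--         key = (s, e)
--         if key in memo:
--             return memo[key]
--         v1, p1 = solve(s + 2, e)
--         v2, p2 = solve(s + 1, e - 1)
--         if v1 < v2:
--             b1v, b1p = a[s] + v1, [a[s]] + p1
--         else:
--             b1v, b1p = a[s] + v2, [a[s]] + p2
--         v3, p3 = solve(s + 1, e - 1)
--         v4, p4 = solve(s, e - 2)
--         if v3 < v4:
--             b2v, b2p = a[e] + v3, [a[e]] + p3
--         else:
--             b2v, b2p = a[e] + v4, [a[e]] + p4
--         res = (b1v, b1p) if b1v > b2v else (b2v, b2p)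
--         memo[key] = res
--         return res
--
--     v, suffix = solve(start, end)
--     return v, path + suffix
-- ===== Notes on version B (the rewrite author's own statement) =====
-- stated objective: alternative
-- what changed: Replaces A's naive four-way recursion (which threads the growing path prefix through every call) with a memoized top-down DP keyed on (start,end) that stores value and chosen suffix per state and appends the prefix once at the end.
import Mathlib
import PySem

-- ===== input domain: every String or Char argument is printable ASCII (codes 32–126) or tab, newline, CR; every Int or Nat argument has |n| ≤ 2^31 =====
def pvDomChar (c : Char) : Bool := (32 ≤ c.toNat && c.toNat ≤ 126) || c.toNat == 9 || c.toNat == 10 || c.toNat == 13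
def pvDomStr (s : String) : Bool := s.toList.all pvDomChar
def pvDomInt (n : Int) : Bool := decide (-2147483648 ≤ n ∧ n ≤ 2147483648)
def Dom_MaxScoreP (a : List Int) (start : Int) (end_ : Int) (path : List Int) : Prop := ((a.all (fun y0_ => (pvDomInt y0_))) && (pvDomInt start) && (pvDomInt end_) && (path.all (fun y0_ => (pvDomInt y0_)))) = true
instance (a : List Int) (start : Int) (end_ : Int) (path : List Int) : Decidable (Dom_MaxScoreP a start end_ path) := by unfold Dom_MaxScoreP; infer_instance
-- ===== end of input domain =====

-- B: memoized top-down DP on (start,end) storing value and chosen suffix, prefix appended once; equivalence is about the return value.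
-- shared index helper: a[i] with Python semantics; the 0 default is only reached outside Pre_ (where Python raises IndexError)
def pyAt (a : List Int) (i : Int) : Int := (PySem.List.pyGet? a i).getD 0

-- ===== PORT A =====
-- fuel = (end_ - start + 2).toNat only makes the recursion structural; the 0 case is reached only when start > end_
def MaxScorePGo : Nat → List Int → Int → Int → List Int → Int × List Int
  | 0, _, _, _, path => (0, path)
  | fuel + 1, a, start, end_, path =>
    if start > end_ then (0, path)
    else
      let r1 := MaxScorePGo fuel a (start + 2) end_ (path ++ [pyAt a start])
      let r2 := MaxScorePGo fuel a (start + 1) (end_ - 1) (path ++ [pyAt a start])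
      let b1 := if r1.1 < r2.1 then (pyAt a start + r1.1, r1.2) else (pyAt a start + r2.1, r2.2)
      let r3 := MaxScorePGo fuel a (start + 1) (end_ - 1) (path ++ [pyAt a end_])
      let r4 := MaxScorePGo fuel a start (end_ - 2) (path ++ [pyAt a end_])
      let b2 := if r3.1 < r4.1 then (pyAt a end_ + r3.1, r3.2) else (pyAt a end_ + r4.1, r4.2)
      if b1.1 > b2.1 then b1 else b2

def MaxScoreP (a : List Int) (start : Int) (end_ : Int) (path : List Int) : Int × List Int :=
  MaxScorePGo (end_ - start + 2).toNat a start end_ path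

-- ===== PORT B =====
-- memoized solver: memo maps a state (s, e) to (value, chosen suffix); fuel is the same totality guard
def solveBGo : Nat → List Int → PySem.Dict (Int × Int) (Int × List Int) → Int → Int →
    PySem.Dict (Int × Int) (Int × List Int) × (Int × List Int)
  | 0, _, memo, _, _ => (memo, (0, []))
  | fuel + 1, a, memo, s, e =>
    if s > e then (memo, (0, []))
    else
      match memo.get? (s, e) with
      | some v => (memo, v)
      | none =>
        let r1 := solveBGo fuel a memo (s + 2) e
        let r2 := solveBGo fuel a r1.1 (s + 1) (e - 1)
        let b1 := if r1.2.1 < r2.2.1 then (pyAt a s + r1.2.1, pyAt a s :: r1.2.2)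
                  else (pyAt a s + r2.2.1, pyAt a s :: r2.2.2)
        let r3 := solveBGo fuel a r2.1 (s + 1) (e - 1)
        let r4 := solveBGo fuel a r3.1 s (e - 2)
        let b2 := if r3.2.1 < r4.2.1 then (pyAt a e + r3.2.1, pyAt a e :: r3.2.2)
                  else (pyAt a e + r4.2.1, pyAt a e :: r4.2.2)
        let res := if b1.1 > b2.1 then b1 else b2
        (r4.1.insert (s, e) res, res)

def MaxScoreP_alt (a : List Int) (start : Int) (end_ : Int) (path : List Int) : Int × List Int :=
  let r := solveBGo (end_ - start + 2).toNat a PySem.Dict.empty start end_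
  (r.2.1, path ++ r.2.2)

-- ===== PRECONDITION & SPEC =====
-- Pre_ excludes exactly the inputs on which Python's A raises IndexError (some a[i] out of range during the recursion).
def Pre_MaxScoreP (a : List Int) (start : Int) (end_ : Int) (path : List Int) : Prop :=
  start > end_ ∨ (-(a.length : Int) ≤ start ∧ end_ < (a.length : Int))
instance (a : List Int) (start : Int) (end_ : Int) (path : List Int) : Decidable (Pre_MaxScoreP a start end_ path) := by unfold Pre_MaxScoreP; infer_instance
def pvWitness_MaxScoreP : List Int × Int × Int × List Int := ([8, 15, 3, 7], 0, 3, [])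

def Spec_MaxScoreP (a : List Int) (start : Int) (end_ : Int) (path : List Int) (out : Int × List Int) : Prop := out = MaxScoreP_alt a start end_ path
instance (a : List Int) (start : Int) (end_ : Int) (path : List Int) (out : Int × List Int) : Decidable (Spec_MaxScoreP a start end_ path out) := by unfold Spec_MaxScoreP; infer_instance

-- ===== CLAIM (what is proved, stated in full; the proofs are below) =====
def Claim_equal_MaxScoreP : Prop := ∀ (a : List Int) (start : Int) (end_ : Int) (path : List Int), Dom_MaxScoreP a start end_ path → Pre_MaxScoreP a start end_ path → Spec_MaxScoreP a start end_ path (MaxScoreP a start end_ path)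

-- ===== LEMMAS AND PROOFS =====

theorem go_base (f : ℕ) (a : List Int) (s e : Int) (p : List Int) (h : s > e) :
    MaxScorePGo f a s e p = (0, p) := by
  cases f <;> simp [MaxScorePGo, h]

-- the path prefix only gets appended
theorem go_prefix (f : ℕ) : ∀ (a : List Int) (s e : Int) (p : List Int),
    MaxScorePGo f a s e p = ((MaxScorePGo f a s e []).1, p ++ (MaxScorePGo f a s e []).2) := by
  induction f with
  | zero => intro a s e p; simp [MaxScorePGo]
  | succ f ih =>
    intro a s e p
    by_cases h : s > e
    · simp [MaxScorePGo, h]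
    · rw [MaxScorePGo, MaxScorePGo]
      simp only [if_neg h]
      rw [ih a (s + 2) e (p ++ [pyAt a s]),
          ih a (s + 2) e ([] ++ [pyAt a s]),
          ih a (s + 1) (e - 1) (p ++ [pyAt a s]),
          ih a (s + 1) (e - 1) ([] ++ [pyAt a s]),
          ih a (s + 1) (e - 1) (p ++ [pyAt a e]),
          ih a (s + 1) (e - 1) ([] ++ [pyAt a e]),
          ih a s (e - 2) (p ++ [pyAt a e]),
          ih a s (e - 2) ([] ++ [pyAt a e])]
      dsimp only
      split_ifs <;> simp [List.append_assoc]

-- enough fuel makes the fuel irrelevant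
theorem go_fuel (f : ℕ) : ∀ (g : ℕ) (a : List Int) (s e : Int) (p : List Int),
    (e - s + 2).toNat ≤ f → (e - s + 2).toNat ≤ g →
    MaxScorePGo f a s e p = MaxScorePGo g a s e p := by
  induction f with
  | zero =>
    intro g a s e p hf _
    have h : s > e := by omega
    rw [go_base, go_base] <;> omega
  | succ f ih =>
    intro g a s e p hf hg
    by_cases h : s > e
    · rw [go_base, go_base] <;> omega
    · cases g with
      | zero => omega
      | succ g =>
        rw [MaxScorePGo, MaxScorePGo]
        simp only [if_neg h]
        rw [ih g a (s + 2) e (p ++ [pyAt a s]) (by omega) (by omega),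
            ih g a (s + 1) (e - 1) (p ++ [pyAt a s]) (by omega) (by omega),
            ih g a (s + 1) (e - 1) (p ++ [pyAt a e]) (by omega) (by omega),
            ih g a s (e - 2) (p ++ [pyAt a e]) (by omega) (by omega)]

theorem go_eq_max (f : ℕ) (a : List Int) (s e : Int) (p : List Int)
    (h : (e - s + 2).toNat ≤ f) : MaxScorePGo f a s e p = MaxScoreP a s e p :=
  go_fuel f ((e - s + 2).toNat) a s e p h (le_refl _)

-- A's result at [] with the prefix prepended
theorem MaxScoreP_prefix (a : List Int) (s e : Int) (p : List Int) :
    MaxScoreP a s e p = ((MaxScoreP a s e []).1, p ++ (MaxScoreP a s e []).2) := by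
  unfold MaxScoreP
  exact go_prefix _ a s e p

-- memo entries built by solveBGo stay correct once the inserted value is
theorem insert_inv (a : List Int) (d : PySem.Dict (Int × Int) (Int × List Int)) (s e : Int)
    (r : Int × List Int)
    (hd : ∀ k v, d.get? k = some v → v = MaxScoreP a k.1 k.2 [])
    (hr : r = MaxScoreP a s e []) :
    ∀ k v, (d.insert (s, e) r).get? k = some v → v = MaxScoreP a k.1 k.2 [] := by
  intro k v hk
  rw [PySem.Dict.get?_insert] at hk
  split_ifs at hk with hk'
  · cases hk
    subst hk'
    exact hr
  · exact hd _ _ hk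

-- the memoized solver computes MaxScoreP at the empty path and keeps the memo correct
theorem solveB_spec (f : ℕ) : ∀ (a : List Int) (memo : PySem.Dict (Int × Int) (Int × List Int)) (s e : Int),
    (∀ k v, memo.get? k = some v → v = MaxScoreP a k.1 k.2 []) →
    (e - s + 2).toNat ≤ f →
    (solveBGo f a memo s e).2 = MaxScoreP a s e [] ∧
      (∀ k v, (solveBGo f a memo s e).1.get? k = some v → v = MaxScoreP a k.1 k.2 []) := by
  induction f with
  | zero =>
    intro a memo s e hinv hf
    have h : s > e := by omega
    rw [solveBGo]
    refine ⟨?_, hinv⟩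
    unfold MaxScoreP
    rw [go_base _ _ _ _ _ h]
  | succ f ih =>
    intro a memo s e hinv hf
    by_cases h : s > e
    · rw [solveBGo]
      simp only [if_pos h]
      refine ⟨?_, hinv⟩
      unfold MaxScoreP
      rw [go_base _ _ _ _ _ h]
    · obtain ⟨h1v, h1m⟩ := ih a memo (s + 2) e hinv (by omega)
      obtain ⟨h2v, h2m⟩ := ih a (solveBGo f a memo (s + 2) e).1 (s + 1) (e - 1) h1m (by omega)
      obtain ⟨h3v, h3m⟩ := ih a (solveBGo f a (solveBGo f a memo (s + 2) e).1 (s + 1) (e - 1)).1 (s + 1) (e - 1) h2m (by omega)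
      obtain ⟨h4v, h4m⟩ := ih a (solveBGo f a (solveBGo f a (solveBGo f a memo (s + 2) e).1 (s + 1) (e - 1)).1 (s + 1) (e - 1)).1 s (e - 2) h3m (by omega)
      rw [solveBGo]
      simp only [if_neg h]
      cases hg : memo.get? (s, e) with
      | some v =>
        exact ⟨hinv _ _ hg, hinv⟩
      | none =>
        dsimp only
        rw [h1v, h2v, h3v, h4v]
        have hval :
            (if (if (MaxScoreP a (s + 2) e []).1 < (MaxScoreP a (s + 1) (e - 1) []).1 then
                  (pyAt a s + (MaxScoreP a (s + 2) e []).1, pyAt a s :: (MaxScoreP a (s + 2) e []).2)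
                else
                  (pyAt a s + (MaxScoreP a (s + 1) (e - 1) []).1, pyAt a s :: (MaxScoreP a (s + 1) (e - 1) []).2)).1 >
                (if (MaxScoreP a (s + 1) (e - 1) []).1 < (MaxScoreP a s (e - 2) []).1 then
                  (pyAt a e + (MaxScoreP a (s + 1) (e - 1) []).1, pyAt a e :: (MaxScoreP a (s + 1) (e - 1) []).2)
                else
                  (pyAt a e + (MaxScoreP a s (e - 2) []).1, pyAt a e :: (MaxScoreP a s (e - 2) []).2)).1 then
              (if (MaxScoreP a (s + 2) e []).1 < (MaxScoreP a (s + 1) (e - 1) []).1 then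
                  (pyAt a s + (MaxScoreP a (s + 2) e []).1, pyAt a s :: (MaxScoreP a (s + 2) e []).2)
                else
                  (pyAt a s + (MaxScoreP a (s + 1) (e - 1) []).1, pyAt a s :: (MaxScoreP a (s + 1) (e - 1) []).2))
            else
              (if (MaxScoreP a (s + 1) (e - 1) []).1 < (MaxScoreP a s (e - 2) []).1 then
                  (pyAt a e + (MaxScoreP a (s + 1) (e - 1) []).1, pyAt a e :: (MaxScoreP a (s + 1) (e - 1) []).2)
                else
                  (pyAt a e + (MaxScoreP a s (e - 2) []).1, pyAt a e :: (MaxScoreP a s (e - 2) []).2))) =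
            MaxScoreP a s e [] := by
          conv_rhs => rw [show MaxScoreP a s e [] = MaxScorePGo (f + 1) a s e [] from
            (go_eq_max (f + 1) a s e [] (by omega)).symm]
          rw [MaxScorePGo]
          simp only [if_neg h]
          rw [go_eq_max f a (s + 2) e ([] ++ [pyAt a s]) (by omega),
              go_eq_max f a (s + 1) (e - 1) ([] ++ [pyAt a s]) (by omega),
              go_eq_max f a (s + 1) (e - 1) ([] ++ [pyAt a e]) (by omega),
              go_eq_max f a s (e - 2) ([] ++ [pyAt a e]) (by omega)]
          rw [MaxScoreP_prefix a (s + 2) e ([] ++ [pyAt a s]),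
              MaxScoreP_prefix a (s + 1) (e - 1) ([] ++ [pyAt a s]),
              MaxScoreP_prefix a (s + 1) (e - 1) ([] ++ [pyAt a e]),
              MaxScoreP_prefix a s (e - 2) ([] ++ [pyAt a e])]
          dsimp only
          split_ifs <;> simp
        exact ⟨hval, insert_inv a _ s e _ h4m hval⟩

-- ===== VERDICT (by name: the statement is the Claim_ definition above) =====
theorem MaxScoreP_spec : Claim_equal_MaxScoreP := by
  intro a start end_ path _ _
  unfold Spec_MaxScoreP MaxScoreP_alt
  have hs := solveB_spec ((end_ - start + 2).toNat) a PySem.Dict.empty start end_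
      (by intro k v hk; simp [PySem.Dict.get?_empty] at hk) (le_refl _)
  dsimp only
  rw [hs.1]
  exact MaxScoreP_prefix a start end_ path
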